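-- pv_equiv track=rewrite | github.com/TimoFreiberg/dotfiles | agents/skills/review/scope.py | format_commit_list
-- ===== SOURCE A (Python) =====
-- def format_commit_list(commits: list[str]) -> str:
--     if not commits:
--         return ""
--     if len(commits) <= 5:
--         return "\n".join(f"  {c}" for c in commits)
--     head = "\n".join(f"  {c}" for c in commits[:2])
--     tail = "\n".join(f"  {c}" for c in commits[-2:])
--     return f"{head}\n  ...({len(commits) - 4} more)...\n{tail}"
-- ===== SOURCE B (Python) =====
-- def format_commit_list(commits: list[str]) -> str:
--     n = len(commits)
--     lines = []
--     for i, c in enumerate(commits):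
--         if n <= 5 or i < 2 or i >= n - 2:
--             lines.append(f"  {c}")
--         elif i == 2:
--             lines.append(f"  ...({n - 4} more)...")
--     return "\n".join(lines)
-- ===== Notes on version B (the rewrite author's own statement) =====
-- stated objective: simpler
-- what changed: B drops A's slice-and-concatenate scheme (commits[:2], commits[-2:], three separate joins and an f-string template) for a single enumerate pass that decides per index whether the line is visible or replaced by the ellipsis, joining one accumulated list; the empty case falls out of the empty join.
import Mathlib
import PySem

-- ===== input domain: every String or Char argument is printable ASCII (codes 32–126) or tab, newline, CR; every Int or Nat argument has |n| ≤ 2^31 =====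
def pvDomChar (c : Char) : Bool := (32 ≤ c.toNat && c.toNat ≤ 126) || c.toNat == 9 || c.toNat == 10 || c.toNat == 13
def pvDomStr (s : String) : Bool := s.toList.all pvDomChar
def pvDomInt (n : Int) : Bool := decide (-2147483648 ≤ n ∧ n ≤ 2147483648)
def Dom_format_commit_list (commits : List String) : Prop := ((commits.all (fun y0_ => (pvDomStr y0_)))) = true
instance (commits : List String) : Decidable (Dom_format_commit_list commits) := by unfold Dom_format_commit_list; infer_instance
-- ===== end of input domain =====

-- B replaces A's slice-and-concatenate scheme (three joins over commits[:2], commits[-2:] and a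
-- template) by a single enumerate pass that decides per index whether to emit the line or the
-- ellipsis; objective: simpler (one uniform loop, the empty case falls out of the empty join).

-- ===== PORT A =====
def format_commit_list (commits : List String) : String :=
  if commits = [] then ""
  else if commits.length ≤ 5 then
    PySem.Str.join "\n" (commits.map (fun c => "  " ++ c))
  else
    let head := PySem.Str.join "\n" ((PySem.List.slice commits none (some 2)).map (fun c => "  " ++ c))
    let tail := PySem.Str.join "\n" ((PySem.List.slice commits (some (-2)) none).map (fun c => "  " ++ c))
    head ++ "\n  ...(" ++ PySem.Int.toStr ((commits.length : Int) - 4) ++ " more)...\n" ++ tail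

-- ===== PORT B =====
-- single pass: 'for i, c in enumerate(commits)' appending the visible lines / the ellipsis line
def format_commit_list_alt (commits : List String) : String :=
  let n : Int := commits.length
  let lines := (PySem.List.enumerate commits 0).foldl
    (fun acc ic =>
      if n ≤ 5 ∨ ic.1 < 2 ∨ n - 2 ≤ ic.1 then acc ++ ["  " ++ ic.2]
      else if ic.1 = 2 then acc ++ ["  ...(" ++ PySem.Int.toStr (n - 4) ++ " more)..."]
      else acc)
    []
  PySem.Str.join "\n" lines

-- ===== PRECONDITION & SPEC =====
def Spec_format_commit_list (commits : List String) (out : String) : Prop := out = format_commit_list_alt commits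
instance (commits : List String) (out : String) : Decidable (Spec_format_commit_list commits out) := by unfold Spec_format_commit_list; infer_instance

-- ===== CLAIM (what is proved, stated in full; the proofs are below) =====
def Claim_equal_format_commit_list : Prop := ∀ (commits : List String), Dom_format_commit_list commits → Spec_format_commit_list commits (format_commit_list commits)

-- ===== LEMMAS AND PROOFS =====

-- the per-index emitter of B, as a flatMap body
def pvEmit (n : Int) (ell : String) (ic : Int × String) : List String :=
  if n ≤ 5 ∨ ic.1 < 2 ∨ n - 2 ≤ ic.1 then ["  " ++ ic.2]
  else if ic.1 = 2 then [ell]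
  else []

theorem alt_fold_eq_flatMap (n : Int) (ell : String) (cs : List String) (j : Int) (acc : List String) :
    (PySem.List.enumerate cs j).foldl
      (fun acc ic =>
        if n ≤ 5 ∨ ic.1 < 2 ∨ n - 2 ≤ ic.1 then acc ++ ["  " ++ ic.2]
        else if ic.1 = 2 then acc ++ [ell]
        else acc)
      acc
    = acc ++ (PySem.List.enumerate cs j).flatMap (pvEmit n ell) := by
  have h : (fun (acc : List String) (ic : Int × String) =>
        if n ≤ 5 ∨ ic.1 < 2 ∨ n - 2 ≤ ic.1 then acc ++ ["  " ++ ic.2]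
        else if ic.1 = 2 then acc ++ [ell]
        else acc)
      = fun acc ic => acc ++ pvEmit n ell ic := by
    funext acc ic
    unfold pvEmit
    split_ifs <;> simp
  rw [h, PySem.List.foldl_append_eq_flatMap]

-- every index is visible when n ≤ 5
theorem emit_all_small (n : Int) (ell : String) (hn : n ≤ 5) (cs : List String) (j : Int) :
    (PySem.List.enumerate cs j).flatMap (pvEmit n ell) = cs.map (fun c => "  " ++ c) := by
  induction cs generalizing j with
  | nil => simp [PySem.List.enumerate_nil]
  | cons c cs ih =>
      rw [PySem.List.enumerate_cons]
      simp only [List.flatMap_cons, List.map_cons]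
      rw [ih]
      unfold pvEmit
      simp [hn]

-- past index 2 in the big case: only the last two indices (n-2 ≤ i) emit
theorem emit_mid (n : Int) (ell : String) (hn : ¬ n ≤ 5) (cs : List String) (j : Int)
    (hj : 2 < j) (hlen : j + cs.length = n) :
    (PySem.List.enumerate cs j).flatMap (pvEmit n ell)
      = (cs.drop (n - 2 - j).toNat).map (fun c => "  " ++ c) := by
  induction cs generalizing j with
  | nil => simp [PySem.List.enumerate_nil]
  | cons c cs ih =>
      rw [PySem.List.enumerate_cons]
      simp only [List.flatMap_cons]
      have hlen' : (j + 1) + (cs.length : Int) = n := by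
        simp at hlen ⊢; omega
      rw [ih (j + 1) (by omega) hlen']
      by_cases hvis : n - 2 ≤ j
      · have h0 : (n - 2 - j).toNat = 0 := by omega
        have h0' : (n - 2 - (j + 1)).toNat = 0 := by omega
        unfold pvEmit
        simp [hvis, h0, h0']
      · have hpos : (n - 2 - j).toNat = (n - 2 - (j + 1)).toNat + 1 := by omega
        unfold pvEmit
        simp only [hvis, hn, or_false, false_or]
        have hj2 : ¬ (j < 2) := by omega
        have hje : ¬ (j = 2) := by omega
        simp [hj2, hje, hpos]

theorem join_front_append {sep : List Char} (x : List Char) (xs : List (List Char)) (y : List Char) (ys : List (List Char)) :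
    PySem.Chars.join sep (x :: xs ++ y :: ys)
      = PySem.Chars.join sep (x :: xs) ++ sep ++ PySem.Chars.join sep (y :: ys) := by
  induction xs generalizing x with
  | nil => simp [PySem.Chars.join_cons_cons, PySem.Chars.join_singleton]
  | cons z zs ih =>
      simp only [List.cons_append] at ih ⊢
      rw [PySem.Chars.join_cons_cons]
      rw [ih z, PySem.Chars.join_cons_cons]
      simp [List.append_assoc]

theorem format_commit_list_spec_aux (commits : List String) :
    format_commit_list commits = format_commit_list_alt commits := by
  unfold format_commit_list_alt
  dsimp only
  rw [alt_fold_eq_flatMap]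
  simp only [List.nil_append]
  by_cases hnil : commits = []
  · subst hnil; decide
  · by_cases h5 : commits.length ≤ 5
    · have h5' : (commits.length : Int) ≤ 5 := by exact_mod_cast h5
      rw [emit_all_small _ _ h5']
      simp [format_commit_list, hnil, h5]
    · have h5' : ¬ (commits.length : Int) ≤ 5 := by
        simp only [not_le] at h5 ⊢; exact_mod_cast h5
      match commits with
      | a :: b :: c :: rest =>
        have h6 : 6 ≤ rest.length + 3 := by
          have := Nat.lt_of_not_le h5; simp at this; omega
        set L := a :: b :: c :: rest with hL
        have hn : (L.length : Int) = (rest.length : Int) + 3 := by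
          simp [hL]; omega
        rw [PySem.List.enumerate_cons, PySem.List.enumerate_cons, PySem.List.enumerate_cons]
        simp only [List.flatMap_cons]
        have e0 : pvEmit (L.length : Int) ("  ...(" ++ PySem.Int.toStr ((L.length : Int) - 4) ++ " more)...") (0, a) = ["  " ++ a] := by
          unfold pvEmit; simp
        have e1 : pvEmit (L.length : Int) ("  ...(" ++ PySem.Int.toStr ((L.length : Int) - 4) ++ " more)...") (0 + 1, b) = ["  " ++ b] := by
          unfold pvEmit; simp
        have hc : ¬ ((L.length : Int) ≤ 5 ∨ (0:Int) + 1 + 1 < 2 ∨ (L.length : Int) - 2 ≤ 0 + 1 + 1) := by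
          rw [hn]; omega
        have e2 : pvEmit (L.length : Int) ("  ...(" ++ PySem.Int.toStr ((L.length : Int) - 4) ++ " more)...") (0 + 1 + 1, c)
            = ["  ...(" ++ PySem.Int.toStr ((L.length : Int) - 4) ++ " more)..."] := by
          unfold pvEmit
          rw [if_neg hc, if_pos (by norm_num)]
        rw [e0, e1, e2,
          emit_mid (L.length : Int) _ h5' rest (0 + 1 + 1 + 1) (by omega)
            (by rw [hn]; push_cast; ring)]
        -- now both sides concrete; compare A's slices to the drop
        have htake : PySem.List.slice L none (some 2) = [a, b] := by
          rw [(show ((2 : Int)) = ((2 : Nat) : Int) by norm_num), PySem.List.slice_to_natCast, hL]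
          rfl
        have hdrop : PySem.List.slice L (some (-2)) none = L.drop (L.length - 2) :=
          PySem.List.slice_from_neg_ofNat _ 2 (by simp)
        have hdropeq : ((L.length : Int) - 2 - (0 + 1 + 1 + 1)).toNat = L.length - 5 := by
          simp only [hL, List.length_cons]; omega
        have h1 : L.length - 2 = 3 + (L.length - 5) := by
          simp only [hL, List.length_cons]; omega
        have hdrop' : L.drop (L.length - 2) = rest.drop (L.length - 5) := by
          have hr : rest = L.drop 3 := by simp [hL]
          rw [hr, List.drop_drop, ← h1]
        obtain ⟨t, ts, hts⟩ : ∃ t ts, rest.drop (L.length - 5) = t :: ts := by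
          cases hd : rest.drop (L.length - 5) with
          | nil =>
            have := congrArg List.length hd
            simp only [List.length_drop, List.length_nil, hL, List.length_cons] at this
            omega
          | cons t ts => exact ⟨t, ts, rfl⟩
        simp only [format_commit_list, if_neg hnil, if_neg h5, htake, hdrop, hdrop', hdropeq, hts]
        apply String.toList_inj.mp
        generalize (PySem.Int.toStr ((L.length : Int) - 4)) = k
        simp only [List.map_cons, List.map_nil, List.cons_append, List.nil_append,
          PySem.Str.toList_join, List.map_map, String.toList_append]
        have e3 : (("  ".toList ++ a.toList) ::
            ("  ".toList ++ b.toList) ::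
              ("  ...(".toList ++ k.toList ++ " more)...".toList) ::
                ("  ".toList ++ t.toList) :: List.map (String.toList ∘ fun c => "  " ++ c) ts)
          = ("  ".toList ++ a.toList) :: [("  ".toList ++ b.toList)] ++
              ("  ...(".toList ++ k.toList ++ " more)...".toList) ::
                (("  ".toList ++ t.toList) :: List.map (String.toList ∘ fun c => "  " ++ c) ts) := rfl
        have e4 : (("  ...(".toList ++ k.toList ++ " more)...".toList) ::
                (("  ".toList ++ t.toList) :: List.map (String.toList ∘ fun c => "  " ++ c) ts))
          = ("  ...(".toList ++ k.toList ++ " more)...".toList) :: ([] : List (List Char)) ++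
                (("  ".toList ++ t.toList) :: List.map (String.toList ∘ fun c => "  " ++ c) ts) := rfl
        rw [e3, join_front_append, e4, join_front_append]
        simp [PySem.Chars.join_singleton, List.append_assoc]
      | [] => exact absurd rfl hnil
      | [a] => simp at h5
      | [a, b] => simp at h5

-- ===== VERDICT (by name: the statement is the Claim_ definition above) =====
theorem format_commit_list_spec : Claim_equal_format_commit_list := by
  intro commits _
  exact format_commit_list_spec_aux commits
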